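-- pv_equiv track=rewrite | github.com/harui2019/qurrium | qurry/process/utils/construct.py | qubit_mapper_2_int
-- ===== SOURCE A (Python) =====
-- def cycling_slice(target, start, end, step=1):
--     """Slice a iterable object with cycling.
--
--     Args:
--         target (_SliceableT): The target object.
--         start (int): Index of start.
--         end (int): Index of end.
--         step (int, optional): Step of slice. Defaults to 1.
--
--     Raises:
--         IndexError: Slice out of range.
--
--     Returns:
--         Iterable: The sliced object.
--     """
--     length = len(target)
--     slice_check = {
--         f"start: {start} < -length: {-length}": (start < -length),
--         f"length: {length} < end: {end}": (length < end),
--     }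
--     if any(slice_check.values()):
--         raise IndexError(
--             "Slice out of range: " + ", ".join([f"{k}" for k, v in slice_check.items() if v]) + "."
--         )
--     if length <= 0:
--         return target
--     if start < 0 <= end:
--         new_string = target[start:] + target[:end]
--     else:
--         new_string = target[start:end]
--
--     return new_string[::step]
--
-- def qubit_mapper_2_int(
--     actual_num_qubits: int,
--     selected_qubits: tuple[int, int],
-- ) -> dict[int, int]:
--     """Map the index of selected qubits to the index of the classical register.
--     The selected qubits are defined by two integers.
--
--     Args:
--         actual_num_qubits (int): The actual number of qubits.
--         selected_qubits (tuple[int, int]): The range of the selected qubits.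
--
--     Raises:
--         ValueError: The range of qubits should be defined by two integers.
--         ValueError: The selected qubits are beyond the number of qubits.
--         ValueError: The selected qubits are not natural number.
--         ValueError: The first integer should be less than the second integer.
--
--     Returns:
--         dict[int, int]:
--             The mapping of the index of selected qubits to the index of the classical register.
--     """
--     if not all(isinstance(qi, int) for qi in selected_qubits):
--         raise ValueError(
--             "The range of qubits should be defined by two integers, "
--             + f"but get '{selected_qubits[0]}' with type '{type(selected_qubits[0])}' "
--             + f"and '{selected_qubits[1]}' with type '{type(selected_qubits[1])}'."
--         )
--     if selected_qubits[0] > actual_num_qubits or selected_qubits[1] > actual_num_qubits: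
--         raise ValueError(
--             f"The selected qubits {selected_qubits} "
--             + f"are beyond the number of qubits {actual_num_qubits}."
--         )
--     if selected_qubits[0] >= selected_qubits[1]:
--         raise ValueError(
--             "The first integer should be less than the second integer "
--             + f"when inputs as tuple, but get '{selected_qubits}'."
--         )
--
--     qi_list = cycling_slice(list(range(actual_num_qubits)), selected_qubits[0], selected_qubits[1])
--     return {qi: ci for ci, qi in enumerate(qi_list)}
-- ===== SOURCE B (Python) =====
-- def qubit_mapper_2_int(actual_num_qubits, selected_qubits):
--     """Closed-form re-implementation: map each classical index ci to qubit
--     (start + ci) % n directly, instead of materializing list(range(n)) and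
--     slicing it with cycling_slice."""
--     start, end = selected_qubits
--     if not all(isinstance(qi, int) for qi in selected_qubits):
--         raise ValueError(
--             "The range of qubits should be defined by two integers, "
--             + f"but get '{selected_qubits[0]}' with type '{type(selected_qubits[0])}' "
--             + f"and '{selected_qubits[1]}' with type '{type(selected_qubits[1])}'."
--         )
--     if start > actual_num_qubits or end > actual_num_qubits:
--         raise ValueError(
--             f"The selected qubits {selected_qubits} "
--             + f"are beyond the number of qubits {actual_num_qubits}."
--         )
--     if start >= end:
--         raise ValueError(
--             "The first integer should be less than the second integer "
--             + f"when inputs as tuple, but get '{selected_qubits}'."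
--         )
--     if start < -actual_num_qubits:
--         raise IndexError(
--             f"Slice out of range: start: {start} < -length: {-actual_num_qubits}."
--         )
--     return {(start + ci) % actual_num_qubits: ci for ci in range(end - start)}
-- ===== Notes on version B (the rewrite author's own statement) =====
-- stated objective: alternative
-- what changed: B drops cycling_slice entirely: instead of materializing list(range(n)) and slicing it cyclically, it builds the dict directly from the closed-form modular map (start+ci) % n for ci in range(end-start).
import Mathlib
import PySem

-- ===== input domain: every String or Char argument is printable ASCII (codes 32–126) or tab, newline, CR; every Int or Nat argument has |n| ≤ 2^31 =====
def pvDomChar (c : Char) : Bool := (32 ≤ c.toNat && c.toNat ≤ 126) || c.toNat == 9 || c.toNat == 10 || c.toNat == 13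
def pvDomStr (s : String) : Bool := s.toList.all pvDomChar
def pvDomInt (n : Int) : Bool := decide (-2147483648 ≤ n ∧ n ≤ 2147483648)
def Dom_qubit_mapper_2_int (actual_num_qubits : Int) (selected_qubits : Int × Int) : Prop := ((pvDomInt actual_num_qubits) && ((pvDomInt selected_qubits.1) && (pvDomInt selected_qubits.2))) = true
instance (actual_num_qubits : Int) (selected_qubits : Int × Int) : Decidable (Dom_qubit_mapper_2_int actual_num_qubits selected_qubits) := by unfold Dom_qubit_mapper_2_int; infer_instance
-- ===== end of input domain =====

-- B replaces A's list(range(n))-materialization + cycling_slice by a closed-form modular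
-- index map {(start+ci) % n : ci}; objective: alternative (different decomposition, same cost class).


-- ===== PORT A =====
-- raise paths (IndexError / ValueError) return []; they are excluded by Pre_qubit_mapper_2_int
def cycling_slice (target : List Int) (start : Int) (end_ : Int) (step : Int) : List Int :=
  let length : Int := target.length
  if start < -length ∨ length < end_ then []  -- raise IndexError("Slice out of range: …")
  else if length ≤ 0 then target
  else
    let new_string :=
      if start < 0 ∧ 0 ≤ end_ then
        PySem.List.slice target (some start) none ++ PySem.List.slice target none (some end_)
      else
        PySem.List.slice target (some start) (some end_)
    (PySem.List.slice? new_string none none step).getD []  -- new_string[::step]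

def qubit_mapper_2_int (actual_num_qubits : Int) (selected_qubits : Int × Int) : List (Int × Int) :=
  -- the isinstance-int check always passes for Int arguments
  if selected_qubits.1 > actual_num_qubits ∨ selected_qubits.2 > actual_num_qubits then []  -- raise ValueError
  else if selected_qubits.1 ≥ selected_qubits.2 then []  -- raise ValueError
  else
    let qi_list := cycling_slice (PySem.List.pyRange 0 actual_num_qubits 1)
      selected_qubits.1 selected_qubits.2 1
    ((PySem.List.enumerate qi_list 0).foldl
      (fun d p => d.insert p.2 p.1) (PySem.Dict.empty : PySem.Dict Int Int)).items

-- ===== PORT B =====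
def qubit_mapper_2_int_alt (actual_num_qubits : Int) (selected_qubits : Int × Int) : List (Int × Int) :=
  if selected_qubits.1 > actual_num_qubits ∨ selected_qubits.2 > actual_num_qubits then []  -- raise ValueError
  else if selected_qubits.1 ≥ selected_qubits.2 then []  -- raise ValueError
  else if selected_qubits.1 < -actual_num_qubits then []  -- raise IndexError
  else
    ((PySem.List.pyRange 0 (selected_qubits.2 - selected_qubits.1) 1).foldl
      (fun d ci => d.insert (PySem.Int.mod (selected_qubits.1 + ci) actual_num_qubits) ci)
      (PySem.Dict.empty : PySem.Dict Int Int)).items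

-- ===== PRECONDITION & SPEC =====
-- Pre_ excludes exactly the inputs where the Python A raises (ValueError when an endpoint
-- exceeds actual_num_qubits or start ≥ end; IndexError when start < -actual_num_qubits).
def Pre_qubit_mapper_2_int (actual_num_qubits : Int) (selected_qubits : Int × Int) : Prop :=
  selected_qubits.1 ≤ actual_num_qubits ∧ selected_qubits.2 ≤ actual_num_qubits ∧
  selected_qubits.1 < selected_qubits.2 ∧ -actual_num_qubits ≤ selected_qubits.1
instance (actual_num_qubits : Int) (selected_qubits : Int × Int) : Decidable (Pre_qubit_mapper_2_int actual_num_qubits selected_qubits) := by unfold Pre_qubit_mapper_2_int; infer_instance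

def pvWitness_qubit_mapper_2_int : Int × (Int × Int) := (3, (-2, 2))

def Spec_qubit_mapper_2_int (actual_num_qubits : Int) (selected_qubits : Int × Int) (out : List (Int × Int)) : Prop := out = qubit_mapper_2_int_alt actual_num_qubits selected_qubits
instance (actual_num_qubits : Int) (selected_qubits : Int × Int) (out : List (Int × Int)) : Decidable (Spec_qubit_mapper_2_int actual_num_qubits selected_qubits out) := by unfold Spec_qubit_mapper_2_int; infer_instance

-- ===== CLAIM (what is proved, stated in full; the proofs are below) =====
def Claim_equal_qubit_mapper_2_int : Prop := ∀ (actual_num_qubits : Int) (selected_qubits : Int × Int), Dom_qubit_mapper_2_int actual_num_qubits selected_qubits → Pre_qubit_mapper_2_int actual_num_qubits selected_qubits → Spec_qubit_mapper_2_int actual_num_qubits selected_qubits (qubit_mapper_2_int actual_num_qubits selected_qubits)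

-- ===== LEMMAS AND PROOFS =====

theorem filterMap_getElem?_range (xs : List Int) :
    (List.range xs.length).filterMap (fun k => xs[k]?) = xs := by
  have : (List.range xs.length).filterMap (fun k => xs[k]?)
      = (List.range xs.length).map (fun k => xs.getD k 0) := by
    apply List.filterMap_eq_map_iff_forall_eq_some.mpr
    intro k hk; simp at hk; simp [hk]
  rw [this]
  refine List.ext_getElem (by simp) ?_
  intro i h1 h2; simp [List.getElem?_eq_getElem h2]

-- [::1] is the identity slice
theorem slice?_step_one (xs : List Int) : PySem.List.slice? xs none none 1 = some xs := by
  simp [PySem.List.slice?, PySem.List.sliceIndices]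
  cases xs with
  | nil => simp
  | cons a l => exact filterMap_getElem?_range (a :: l)

theorem clampIdx_eval (m : Nat) (a : Int) (h0 : -m ≤ a) (h1 : a ≤ m) :
    PySem.List.clampIdx m a = (if a < 0 then (m : Int) + a else a).toNat := by
  unfold PySem.List.clampIdx; split_ifs <;> omega

-- the list cycling_slice builds from range(n) is the closed-form modular map of B
theorem qi_list_eq (n s0 s1 : Int) (h0 : -n ≤ s0) (h1 : s0 < s1) (h2 : s1 ≤ n) :
    cycling_slice (PySem.List.pyRange 0 n 1) s0 s1 1
      = (PySem.List.pyRange 0 (s1 - s0) 1).map (fun ci => PySem.Int.mod (s0 + ci) n) := by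
  have hn : 0 < n := by omega
  have hmodpos : ∀ a : Int, 0 ≤ a → a < n → PySem.Int.mod a n = a := by
    intro a ha hb; rw [PySem.Int.mod_eq_emod_of_pos hn]; exact Int.emod_eq_of_lt ha hb
  have hmodneg : ∀ a : Int, -n ≤ a → a < 0 → PySem.Int.mod a n = a + n := by
    intro a ha hb
    rw [PySem.Int.mod_eq_emod_of_pos hn]
    have h' : (a + n) % n = a % n := by
      have := Int.add_mul_emod_self_left (a := a) (b := n) (c := 1)
      rwa [mul_one] at this
    have h'' := Int.emod_eq_of_lt (a := a + n) (b := n) (by omega) (by omega)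
    omega
  have hlen : ((PySem.List.pyRange 0 n 1).length : Int) = n := by
    simp [PySem.List.length_pyRange_one]; omega
  have hlenN : (PySem.List.pyRange 0 n 1).length = n.toNat := by omega
  unfold cycling_slice
  rw [if_neg (by rw [hlen]; omega), if_neg (by rw [hlen]; omega)]
  simp only [slice?_step_one, Option.getD_some]
  have hc0 : PySem.List.clampIdx (PySem.List.pyRange 0 n 1).length s0
      = (if s0 < 0 then n + s0 else s0).toNat := by
    rw [clampIdx_eval _ _ (by omega) (by omega), hlen]
  by_cases hb : s0 < 0 ∧ 0 ≤ s1
  · rw [if_pos hb, PySem.List.slice_some_none, PySem.List.slice_to _ hb.2, hc0, if_pos hb.1]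
    refine List.ext_getElem ?_ ?_
    · simp [PySem.List.length_pyRange_one, hlenN]; omega
    · intro i hL hR
      simp only [List.length_append, List.length_drop, List.length_take, hlenN] at hL
      rw [List.getElem_map, PySem.List.getElem_pyRange_one]
      by_cases hi : i < (n.toNat - (n + s0).toNat)
      · rw [List.getElem_append_left (by simp [hlenN]; omega)]
        rw [List.getElem_drop, PySem.List.getElem_pyRange_one]
        rw [hmodneg (s0 + (0 + i)) (by omega) (by omega)]
        push_cast; omega
      · rw [List.getElem_append_right (by simp [hlenN]; omega)]
        rw [List.getElem_take, PySem.List.getElem_pyRange_one]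
        rw [hmodpos (s0 + (0 + i)) (by simp at hi ⊢; omega) (by omega)]
        simp [hlenN]
        omega
  · rw [if_neg hb]
    have hslice : PySem.List.slice (PySem.List.pyRange 0 n 1) (some s0) (some s1)
        = ((PySem.List.pyRange 0 n 1).drop (PySem.List.clampIdx (PySem.List.pyRange 0 n 1).length s0)).take
            (PySem.List.clampIdx (PySem.List.pyRange 0 n 1).length s1
              - PySem.List.clampIdx (PySem.List.pyRange 0 n 1).length s0) := by
      simp [PySem.List.slice]
    have hc1 : PySem.List.clampIdx (PySem.List.pyRange 0 n 1).length s1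
        = (if s1 < 0 then n + s1 else s1).toNat := by
      rw [clampIdx_eval _ _ (by omega) (by omega), hlen]
    rw [hslice, hc0, hc1]
    by_cases hs : 0 ≤ s0
    · rw [if_neg (show ¬ s1 < 0 by omega), if_neg (show ¬ s0 < 0 by omega)]
      refine List.ext_getElem ?_ ?_
      · simp [PySem.List.length_pyRange_one, hlenN]; omega
      · intro i hL hR
        simp only [List.length_take, List.length_drop, hlenN] at hL
        rw [List.getElem_map, PySem.List.getElem_pyRange_one, List.getElem_take, List.getElem_drop,
          PySem.List.getElem_pyRange_one]
        rw [hmodpos (s0 + (0 + i)) (by omega) (by omega)]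
        push_cast; omega
    · have hs1 : s1 < 0 := by omega
      rw [if_pos hs1, if_pos (show s0 < 0 by omega)]
      refine List.ext_getElem ?_ ?_
      · simp [PySem.List.length_pyRange_one, hlenN]; omega
      · intro i hL hR
        simp only [List.length_take, List.length_drop, hlenN] at hL
        rw [List.getElem_map, PySem.List.getElem_pyRange_one, List.getElem_take, List.getElem_drop,
          PySem.List.getElem_pyRange_one]
        rw [hmodneg (s0 + (0 + i)) (by omega) (by omega)]
        push_cast; omega

-- ===== VERDICT (by name: the statement is the Claim_ definition above) =====
theorem qubit_mapper_2_int_spec : Claim_equal_qubit_mapper_2_int := by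
  intro n sq _ hpre
  obtain ⟨s0, s1⟩ := sq
  obtain ⟨h3, h2, h1, h0⟩ := hpre
  have hn : 0 < n := by omega
  unfold Spec_qubit_mapper_2_int qubit_mapper_2_int qubit_mapper_2_int_alt
  rw [if_neg (by simp; omega), if_neg (by omega), if_neg (by simp; omega), if_neg (by omega)]
  simp only
  rw [if_neg (by omega)]
  rw [qi_list_eq n s0 s1 h0 h1 h2]
  rw [PySem.List.enumerate_eq_map_pyRange (d := 0)]
  have hlen : PySem.List.len ((PySem.List.pyRange 0 (s1 - s0) 1).map
      (fun ci => PySem.Int.mod (s0 + ci) n)) = s1 - s0 := by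
    simp [PySem.List.len, PySem.List.length_pyRange_one]; omega
  rw [hlen, List.foldl_map]
  congr 1
  apply PySem.List.foldl_congr_mem
  intro d j hj
  rw [PySem.List.mem_pyRange_one] at hj
  rw [PySem.List.pyGetD_map_pyRange_of_nonneg _ _ _ _ hj.1 (by omega)]
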